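-- pv_equiv track=rewrite | github.com/supreetshm947/leetcode_24 | 2940_find_building.py | leftmostBuildingQueries
-- ===== SOURCE A (Python) =====
-- from typing import List
--
-- def leftmostBuildingQueries(heights: List[int], queries: List[List[int]]) -> List[int]:
--
--     result = [-1] * len(queries)
--     # Stores the new queries for each building
--     new_queries = [[] for _ in range(len(heights))]
--     # Monotonic stack to keep the leftmost valid building
--     mono_stack = []
--
--     def binary_search(height: int, mono_stack: List[tuple]) -> int:
--         # Binary search in the monotonic stack to find the highest possible position
--         left, right = 0, len(mono_stack) - 1
--         best_pos = -1
--         while left <= right: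
--             mid = (left + right) // 2
--             if mono_stack[mid][0] > height:
--                 best_pos = mid
--                 left = mid + 1
--             else:
--                 right = mid - 1
--         return best_pos
--
--     # Preprocess the queries
--     for i, (a, b) in enumerate(queries):
--         if a > b:
--             a, b = b, a  # Swap if a > b (ensuring a < b)
--         # Direct answer if the height at b is greater than a or they are the same
--         if heights[b] > heights[a] or a == b:
--             result[i] = b
--         else:
--             new_queries[b].append((heights[a], i))
--
--     # Process buildings from right to left
--     for i in range(len(heights) - 1, -1, -1):
--         # For each query at the current building i, check the conditions
--         for height_a, idx in new_queries[i]: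
--             # Perform binary search to find the appropriate building
--             pos = binary_search(height_a, mono_stack)
--             if pos != -1:
--                 result[idx] = mono_stack[pos][1]
--
--         # Maintain the monotonic stack where heights are strictly increasing
--         while mono_stack and mono_stack[-1][0] <= heights[i]:
--             mono_stack.pop()
--         mono_stack.append((heights[i], i))
--
--     return result
--
-- heights = [6, 4, 8, 5, 2, 7]
--
-- queries = [[0, 1], [0, 3], [2, 4], [3, 4], [2, 2]]
-- ===== SOURCE B (Python) =====
-- def leftmostBuildingQueries(heights, queries):
--     # Simpler per-query left scan: for each non-direct query, walk right from
--     # max(a, b) + 1 until the first strictly taller building.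
--     n = len(heights)
--     res = []
--     for q in queries:
--         a, b = q
--         if a > b:
--             a, b = b, a
--         if a == b or heights[b] > heights[a]:
--             res.append(b)
--         else:
--             h = heights[a]
--             j = b + 1
--             while j < n and heights[j] <= h:
--                 j += 1
--             res.append(j if j < n else -1)
--     return res
-- ===== Notes on version B (the rewrite author's own statement) =====
-- stated objective: simpler
-- what changed: Replaced the right-to-left monotonic stack with per-query binary search by a direct per-query left-to-right scan from max(a,b)+1 for the first strictly taller building.
-- outside the precondition, e.g. on leftmostBuildingQueries([9, 2, 1], [[-2, -1]]): A returns [-1], B returns [0]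
import Mathlib
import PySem

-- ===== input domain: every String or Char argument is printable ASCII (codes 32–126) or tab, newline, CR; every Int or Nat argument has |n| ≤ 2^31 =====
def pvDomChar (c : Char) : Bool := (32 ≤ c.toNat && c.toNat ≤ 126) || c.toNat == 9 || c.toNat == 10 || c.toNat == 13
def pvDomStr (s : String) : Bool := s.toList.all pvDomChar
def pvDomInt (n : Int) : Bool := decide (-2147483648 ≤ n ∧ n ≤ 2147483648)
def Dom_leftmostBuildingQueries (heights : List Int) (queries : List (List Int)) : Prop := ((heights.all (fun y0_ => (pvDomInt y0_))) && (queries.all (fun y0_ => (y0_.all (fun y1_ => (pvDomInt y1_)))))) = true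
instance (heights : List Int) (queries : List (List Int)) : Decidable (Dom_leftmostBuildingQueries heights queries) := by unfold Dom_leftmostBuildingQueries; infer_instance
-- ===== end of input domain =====

-- B replaces A's right-to-left monotonic stack + per-query binary search by a
-- direct per-query left scan for the first strictly taller building (simpler, not faster).

-- ===== PORT A =====

-- the inner while-loop of A's binary_search
def pvBsLoop (stack : List (Int × Int)) (height : Int) (left right best : Int) : Int :=
  if hlr : left ≤ right then
    let mid := PySem.Int.floordiv (left + right) 2
    match PySem.List.pyGet? stack mid with
    | some e =>
        if e.1 > height then pvBsLoop stack height (mid + 1) right mid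
        else pvBsLoop stack height left (mid - 1) best
    | none => best          -- unreachable under Pre_ (0 ≤ left ≤ mid ≤ right < len)
  else best
termination_by (right - left + 1).toNat
decreasing_by
  · have h := PySem.Int.floordiv_two_mid_bounds hlr
    omega
  · have h := PySem.Int.floordiv_two_mid_bounds hlr
    omega

def pvBinarySearch (height : Int) (stack : List (Int × Int)) : Int :=
  pvBsLoop stack height 0 ((stack.length : Int) - 1) (-1)

-- A's 'while mono_stack and mono_stack[-1][0] <= heights[i]: mono_stack.pop()'
def pvPopWhile (h : Int) (s : List (Int × Int)) : List (Int × Int) :=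
  match hl : s.getLast? with
  | some e => if e.1 ≤ h then pvPopWhile h s.dropLast else s
  | none => s
termination_by s.length
decreasing_by
  have hne : s ≠ [] := by intro he; subst he; simp at hl
  have : 0 < s.length := List.length_pos_iff.mpr hne
  simp [List.length_dropLast]; omega

-- A's inner 'for height_a, idx in new_queries[i]' loop
def pvProcBucket (stack : List (Int × Int)) (res : List Int) (bucket : List (Int × Nat)) : List Int :=
  bucket.foldl (fun r e =>
    let pos := pvBinarySearch e.1 stack
    if pos ≠ -1 then r.set e.2 (PySem.List.pyGetD stack pos (0, 0)).2 else r) res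

-- body of A's preprocessing loop over enumerate(queries)
def pvStep1 (heights : List Int) (st : List Int × List (List (Int × Nat))) (iq : Int × List Int) :
    List Int × List (List (Int × Nat)) :=
  let a0 := PySem.List.pyGetD iq.2 0 0
  let b0 := PySem.List.pyGetD iq.2 1 0
  let a := if a0 > b0 then b0 else a0
  let b := if a0 > b0 then a0 else b0
  if PySem.List.pyGetD heights b 0 > PySem.List.pyGetD heights a 0 ∨ a = b then
    (PySem.List.pySetD st.1 iq.1 b, st.2)
  else
    (st.1, PySem.List.pySetD st.2 b
      ((PySem.List.pyGetD st.2 b []) ++ [(PySem.List.pyGetD heights a 0, iq.1.toNat)]))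

-- body of A's right-to-left building loop
def pvStep2 (heights : List Int) (nq : List (List (Int × Nat))) (st : List (Int × Int) × List Int)
    (i : Int) : List (Int × Int) × List Int :=
  let res := pvProcBucket st.1 st.2 (PySem.List.pyGetD nq i [])
  let hi := PySem.List.pyGetD heights i 0
  (pvPopWhile hi st.1 ++ [(hi, i)], res)

def leftmostBuildingQueries (heights : List Int) (queries : List (List Int)) : List Int :=
  let st1 := (PySem.List.enumerate queries 0).foldl (pvStep1 heights)
      (List.replicate queries.length (-1), List.replicate heights.length [])
  let st2 := (PySem.List.pyRange ((heights.length : Int) - 1) (-1) (-1)).foldl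
      (pvStep2 heights st1.2) ([], st1.1)
  st2.2

-- ===== PORT B =====

-- B's 'while j < n and heights[j] <= h: j += 1' followed by 'j if j < n else -1'
def pvScan (heights : List Int) (h : Int) (j : Int) : Int :=
  if hj : j < (heights.length : Int) then
    if PySem.List.pyGetD heights j 0 ≤ h then pvScan heights h (j + 1) else j
  else -1
termination_by ((heights.length : Int) - j).toNat
decreasing_by omega

def leftmostBuildingQueries_alt (heights : List Int) (queries : List (List Int)) : List Int :=
  queries.foldl (fun res q =>
    let a0 := PySem.List.pyGetD q 0 0
    let b0 := PySem.List.pyGetD q 1 0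
    let a := if a0 > b0 then b0 else a0
    let b := if a0 > b0 then a0 else b0
    if a = b ∨ PySem.List.pyGetD heights b 0 > PySem.List.pyGetD heights a 0 then
      res ++ [b]
    else
      res ++ [pvScan heights (PySem.List.pyGetD heights a 0) (b + 1)]) []

-- ===== PRECONDITION & SPEC =====
-- Pre_ restricts to the task's natural domain: each query is a pair of nonnegative in-range
-- building indices.  Excluded: malformed queries (length ≠ 2 or index out of [-n,n): A raises
-- ValueError/IndexError) and negative indices in [-n,-1] (Python wraparound, outside the
-- task's natural domain).
def Pre_leftmostBuildingQueries (heights : List Int) (queries : List (List Int)) : Prop :=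
  ∀ q ∈ queries, q.length = 2 ∧ ∀ x ∈ q, 0 ≤ x ∧ x < (heights.length : Int)
instance (heights : List Int) (queries : List (List Int)) :
    Decidable (Pre_leftmostBuildingQueries heights queries) := by
  unfold Pre_leftmostBuildingQueries; infer_instance

def pvWitness_leftmostBuildingQueries : List Int × List (List Int) :=
  ([6, 4, 8, 5, 2, 7], [[0, 1], [0, 3], [2, 4], [3, 4], [2, 2]])

def Spec_leftmostBuildingQueries (heights : List Int) (queries : List (List Int)) (out : List Int) : Prop :=
  out = leftmostBuildingQueries_alt heights queries
instance (heights : List Int) (queries : List (List Int)) (out : List Int) :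
    Decidable (Spec_leftmostBuildingQueries heights queries out) := by
  unfold Spec_leftmostBuildingQueries; infer_instance

-- ===== CLAIM (what is proved, stated in full; the proofs are below) =====
def Claim_equal_leftmostBuildingQueries : Prop :=
  ∀ (heights : List Int) (queries : List (List Int)),
    Dom_leftmostBuildingQueries heights queries →
    Pre_leftmostBuildingQueries heights queries →
    Spec_leftmostBuildingQueries heights queries (leftmostBuildingQueries heights queries)

-- ===== LEMMAS AND PROOFS =====

-- proof-side model definitions --------------------------------------------------------------

def pvFindFrom (hs : List Int) (h : Int) (j : Nat) : Option Nat :=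
  if hj : j < hs.length then (if h < hs[j] then some j else pvFindFrom hs h (j + 1)) else none
termination_by hs.length - j

def pvMStack (hs : List Int) (i : Nat) : List (Int × Int) :=
  if hi : i < hs.length then
    (pvMStack hs (i + 1)).filter (fun e => hs[i] < e.1) ++ [(hs[i], (i : Int))]
  else []
termination_by hs.length - i

def pvProcModel (hs : List Int) (i : Nat) (res : List Int) (bucket : List (Int × Nat)) : List Int :=
  bucket.foldl (fun r e =>
    match pvFindFrom hs e.1 (i + 1) with
    | some j => r.set e.2 (j : Int)
    | none => r) res

def pvApply (hs : List Int) (nq : List (List (Int × Nat))) : Nat → List Int → List Int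
  | 0, r => r
  | k + 1, r => pvApply hs nq k (pvProcModel hs k r (nq.getD k []))

def pvQa (q : List Int) : Int :=
  if PySem.List.pyGetD q 0 0 > PySem.List.pyGetD q 1 0 then PySem.List.pyGetD q 1 0
  else PySem.List.pyGetD q 0 0
def pvQb (q : List Int) : Int :=
  if PySem.List.pyGetD q 0 0 > PySem.List.pyGetD q 1 0 then PySem.List.pyGetD q 0 0
  else PySem.List.pyGetD q 1 0
abbrev pvDirect (hs : List Int) (q : List Int) : Prop :=
  PySem.List.pyGetD hs (pvQb q) 0 > PySem.List.pyGetD hs (pvQa q) 0 ∨ pvQa q = pvQb q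

def pvBVal (hs : List Int) (q : List Int) : Int :=
  if pvDirect hs q then pvQb q
  else pvScan hs (PySem.List.pyGetD hs (pvQa q) 0) (pvQb q + 1)
theorem pvMStack_pairwise (hs : List Int) (i : Nat) :
    (pvMStack hs i).Pairwise (fun x y => y.1 < x.1) := by
  fun_induction pvMStack hs i with
  | case1 i hi ih =>
    apply List.pairwise_append.mpr
    refine ⟨ih.filter _, List.pairwise_singleton _ _, ?_⟩
    intro x hx y hy
    simp only [List.mem_singleton] at hy
    subst hy
    have := (List.mem_filter.mp hx).2
    simpa using this
  | case2 i hi => simp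

theorem pvPopWhile_eq_filter (h : Int) (s : List (Int × Int))
    (hp : s.Pairwise (fun x y => y.1 < x.1)) :
    pvPopWhile h s = s.filter (fun e => h < e.1) := by
  induction s using List.reverseRecOn with
  | nil => simp [pvPopWhile]
  | append_singleton init e ih =>
    have hpi : init.Pairwise (fun x y => y.1 < x.1) := (List.pairwise_append.mp hp).1
    have hall : ∀ x ∈ init, e.1 < x.1 := by
      intro x hx
      exact (List.pairwise_append.mp hp).2.2 x hx e (by simp)
    have hge : (init ++ [e]).getLast? = some e := by simp
    rw [pvPopWhile]
    split
    next e' heq =>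
      rw [hge] at heq
      injection heq with heq
      subst heq
      simp only [List.dropLast_concat]
      by_cases he : e.1 ≤ h
      · simp only [he, if_true]
        rw [ih hpi, List.filter_append, List.filter_singleton]
        have hne : ¬ h < e.1 := by omega
        simp [hne]
      · simp only [he, if_false]
        have : ∀ x ∈ init ++ [e], h < x.1 := by
          intro x hx
          rcases List.mem_append.mp hx with hx | hx
          · have := hall x hx; omega
          · simp at hx; subst hx; omega
        rw [List.filter_eq_self.mpr]
        intro a ha
        simpa using this a ha
    next heq =>
      rw [hge] at heq
      exact absurd heq (by simp)

theorem pvMStack_step (hs : List Int) (i : Nat) (hi : i < hs.length) :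
    pvPopWhile hs[i] (pvMStack hs (i + 1)) ++ [(hs[i], (i : Int))] = pvMStack hs i := by
  rw [pvPopWhile_eq_filter _ _ (pvMStack_pairwise hs (i+1))]
  conv_rhs => rw [pvMStack]
  simp [hi]

theorem pv_pref_iff (h : Int) (s : List (Int × Int)) (hp : s.Pairwise (fun x y => y.1 < x.1)) :
    ∀ k (hk : k < s.length),
      (h < (s[k]).1 ↔ k < (s.filter (fun e => h < e.1)).length) := by
  induction s with
  | nil => intro k hk; simp at hk
  | cons x xs ih =>
    have hall : ∀ y ∈ xs, y.1 < x.1 := (List.pairwise_cons.mp hp).1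
    have hpt : xs.Pairwise (fun x y => y.1 < x.1) := (List.pairwise_cons.mp hp).2
    intro k hk
    by_cases hx : h < x.1
    · rw [List.filter_cons_of_pos (by simpa using hx)]
      cases k with
      | zero => simpa using hx
      | succ k =>
        simp only [List.getElem_cons_succ, List.length_cons]
        rw [ih hpt k (by simpa using hk)]
        omega
    · have hnone : ∀ y ∈ xs, ¬ h < y.1 := by
        intro y hy; have := hall y hy; omega
      rw [List.filter_cons_of_neg (by simpa using hx)]
      have : xs.filter (fun e => h < e.1) = [] := by
        rw [List.filter_eq_nil_iff]
        intro a ha; simpa using hnone a ha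
      rw [this]
      simp only [List.length_nil]
      cases k with
      | zero => simpa using hx
      | succ k =>
        simp only [List.getElem_cons_succ]
        constructor
        · intro hc
          exact absurd hc (hnone _ (List.getElem_mem _))
        · omega

theorem pv_take_filter (h : Int) (s : List (Int × Int)) (hp : s.Pairwise (fun x y => y.1 < x.1)) :
    s.take (s.filter (fun e => h < e.1)).length = s.filter (fun e => h < e.1) := by
  induction s with
  | nil => simp
  | cons x xs ih =>
    have hall : ∀ y ∈ xs, y.1 < x.1 := (List.pairwise_cons.mp hp).1
    have hpt : xs.Pairwise (fun x y => y.1 < x.1) := (List.pairwise_cons.mp hp).2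
    by_cases hx : h < x.1
    · rw [List.filter_cons_of_pos (by simpa using hx)]
      simp only [List.length_cons, List.take_succ_cons]
      rw [ih hpt]
    · rw [List.filter_cons_of_neg (by simpa using hx)]
      have : xs.filter (fun e => h < e.1) = [] := by
        rw [List.filter_eq_nil_iff]
        intro a ha
        have := hall a ha; simp; omega
      rw [this]
      simp

theorem pvBsLoop_eq (stack : List (Int × Int)) (h : Int)
    (hp : stack.Pairwise (fun x y => y.1 < x.1)) (l r best : Int)
    (h0 : 0 ≤ l) (hlp : l ≤ ((stack.filter (fun e => h < e.1)).length : Int))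
    (hpr : ((stack.filter (fun e => h < e.1)).length : Int) ≤ r + 1)
    (hr : r < (stack.length : Int)) (hb : best = l - 1) :
    pvBsLoop stack h l r best = ((stack.filter (fun e => h < e.1)).length : Int) - 1 := by
  revert h0 hlp hpr hr hb
  fun_induction pvBsLoop stack h l r best with
  | case1 l r best hlr mid e heq hgt ih =>
    intro h0 hlp hpr hr hb
    have hmid := PySem.Int.floordiv_two_mid_bounds hlr
    have hmid0 : 0 ≤ mid := by omega
    have hmidlt : mid < (stack.length : Int) := by omega
    rw [PySem.List.pyGet?_eq_some_getElem stack hmid0 hmidlt] at heq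
    injection heq with heq
    have hiff := pv_pref_iff h stack hp mid.toNat (by omega)
    rw [heq] at hiff
    have hlt : mid.toNat < (stack.filter (fun e => h < e.1)).length := hiff.mp hgt
    apply ih
    · omega
    · omega
    · omega
    · omega
    · omega
  | case2 l r best hlr mid e heq hgt ih =>
    intro h0 hlp hpr hr hb
    have hmid := PySem.Int.floordiv_two_mid_bounds hlr
    have hmid0 : 0 ≤ mid := by omega
    have hmidlt : mid < (stack.length : Int) := by omega
    rw [PySem.List.pyGet?_eq_some_getElem stack hmid0 hmidlt] at heq
    injection heq with heq
    have hiff := pv_pref_iff h stack hp mid.toNat (by omega)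
    rw [heq] at hiff
    have hge : ¬ mid.toNat < (stack.filter (fun e => h < e.1)).length := fun hc => hgt (by simpa using hiff.mpr hc)
    apply ih
    · omega
    · omega
    · omega
    · omega
    · omega
  | case3 l r best hlr mid heq =>
    intro h0 hlp hpr hr hb
    have hmid := PySem.Int.floordiv_two_mid_bounds hlr
    rw [PySem.List.pyGet?_eq_some_getElem stack (by omega) (by omega)] at heq
    exact absurd heq (by simp)
  | case4 l r best hlr =>
    intro h0 hlp hpr hr hb
    omega

theorem pvBinarySearch_eq (stack : List (Int × Int)) (h : Int)
    (hp : stack.Pairwise (fun x y => y.1 < x.1)) :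
    pvBinarySearch h stack = ((stack.filter (fun e => h < e.1)).length : Int) - 1 := by
  have hf : (stack.filter (fun e => h < e.1)).length ≤ stack.length := List.length_filter_le _ _
  apply pvBsLoop_eq stack h hp 0 ((stack.length : Int) - 1) (-1) (by omega) (by omega) (by omega)
  · omega
  · rfl

theorem pvMStack_filter_getLast (hs : List Int) (h : Int) (i : Nat) :
    ((pvMStack hs i).filter (fun e => h < e.1)).getLast?
      = (pvFindFrom hs h i).map (fun k => (hs.getD k 0, (k : Int))) := by
  fun_induction pvMStack hs i with
  | case1 i hi ih =>
    rw [List.filter_append]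
    by_cases hx : h < hs[i]
    · rw [List.filter_singleton]
      simp only [hx, decide_true, cond_true]
      rw [List.getLast?_concat]
      rw [pvFindFrom]
      simp [hi, hx, List.getD_eq_getElem?_getD]
    · rw [List.filter_singleton]
      simp only [hx, decide_false, cond_false]
      rw [List.append_nil, List.filter_filter]
      have hcong : ∀ e ∈ pvMStack hs (i + 1),
          (decide (h < e.1) && decide (hs[i] < e.1)) = decide (h < e.1) := by
        intro e _
        by_cases he : h < e.1
        · have : hs[i] < e.1 := by omega
          simp [he, this]
        · simp [he]
      rw [List.filter_congr hcong, ih]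
      conv_rhs => rw [pvFindFrom]
      simp [hi, hx]
  | case2 i hi =>
    rw [pvFindFrom]
    simp [hi]

theorem pvProcBucket_eq (hs : List Int) (i : Nat) (res : List Int) (bucket : List (Int × Nat)) :
    pvProcBucket (pvMStack hs (i + 1)) res bucket = pvProcModel hs i res bucket := by
  unfold pvProcBucket pvProcModel
  congr 1
  funext r e
  have hp := pvMStack_pairwise hs (i + 1)
  set S := pvMStack hs (i + 1) with hS
  have hbs := pvBinarySearch_eq S e.1 hp
  have hgl := pvMStack_filter_getLast hs e.1 (i + 1)
  rw [← hS] at hgl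
  set p := (S.filter (fun x => e.1 < x.1)).length with hpdef
  by_cases hz : p = 0
  · have hfil : S.filter (fun x => e.1 < x.1) = [] := List.length_eq_zero_iff.mp hz
    have hnone : pvFindFrom hs e.1 (i + 1) = none := by
      rw [hfil] at hgl
      simp at hgl
      exact hgl
    rw [hnone]
    simp [hbs, hz]
  · have hpos : 0 < p := Nat.pos_of_ne_zero hz
    have hfl : p ≤ S.length := by
      rw [hpdef]; exact List.length_filter_le _ _
    have hne : S.filter (fun x => e.1 < x.1) ≠ [] := by
      intro hc; rw [hc] at hpdef; simp at hpdef; omega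
    obtain ⟨x, hx⟩ := Option.ne_none_iff_exists'.mp (mt List.getLast?_eq_none_iff.mp hne)
    rw [hx] at hgl
    obtain ⟨k, hk, hxk⟩ : ∃ k, pvFindFrom hs e.1 (i + 1) = some k ∧ x = (hs.getD k 0, (k : Int)) := by
      cases hff : pvFindFrom hs e.1 (i + 1) with
      | none => rw [hff] at hgl; simp at hgl
      | some k =>
        rw [hff] at hgl
        simp only [Option.map_some] at hgl
        injection hgl with hgl
        exact ⟨k, rfl, hgl⟩
    rw [hk]
    simp only [hbs]
    have hcond : ((p : Int) - 1 ≠ -1) := by omega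
    rw [if_pos hcond]
    have hget : PySem.List.pyGetD S ((p : Int) - 1) (0, 0) = x := by
      rw [PySem.List.pyGetD_eq_getElem S (0,0) (by omega) (by omega)]
      have htf := pv_take_filter e.1 S hp
      have hlast := List.getLast?_eq_getElem? (l := S.filter (fun x => e.1 < x.1))
      rw [hx] at hlast
      have hpn : ((p : Int) - 1).toNat = p - 1 := by omega
      have hq : S[((p : Int) - 1).toNat]? = some x := by
        rw [hpn]
        rw [← List.getElem?_take_of_lt (j := p) (by omega)]
        rw [htf]
        exact hlast.symm
      obtain ⟨_, hEq⟩ := List.getElem?_eq_some_iff.mp hq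
      exact hEq
    rw [hget, hxk]

theorem pvLoop2_eq (hs : List Int) (nq : List (List (Int × Nat))) :
    ∀ (k : Nat) (r : List Int), k ≤ hs.length →
      ((PySem.List.pyRange ((k : Int) - 1) (-1) (-1)).foldl (pvStep2 hs nq) (pvMStack hs k, r)).2
        = pvApply hs nq k r := by
  intro k
  induction k with
  | zero =>
    intro r hk
    rw [PySem.List.pyRange_neg_one_eq_nil (by omega)]
    simp [pvApply]
  | succ k ih =>
    intro r hk
    have hkl : k < hs.length := by omega
    rw [PySem.List.pyRange_neg_one_cons (by omega)]
    rw [List.foldl_cons]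
    have hstep : pvStep2 hs nq (pvMStack hs (k + 1), r) (((k + 1 : Nat) : Int) - 1)
        = (pvMStack hs k, pvProcModel hs k r (nq.getD k [])) := by
      unfold pvStep2
      have hki : ((k + 1 : Nat) : Int) - 1 = ((k : Nat) : Int) := by omega
      rw [hki]
      simp only [PySem.List.pyGetD_natCast]
      rw [pvProcBucket_eq]
      have hgd : hs.getD k 0 = hs[k] := List.getD_eq_getElem hs 0 hkl
      rw [hgd, pvMStack_step hs k hkl]
    rw [hstep]
    have hkr : ((k + 1 : Nat) : Int) - 1 - 1 = ((k : Nat) : Int) - 1 := by omega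
    rw [hkr]
    rw [ih _ (by omega)]
    rfl

theorem pvStep1_direct (hs : List Int) (st : List Int × List (List (Int × Nat))) (i : Int)
    (q : List Int) (hd : pvDirect hs q) :
    pvStep1 hs st (i, q) = (PySem.List.pySetD st.1 i (pvQb q), st.2) := by
  unfold pvDirect pvQa pvQb at hd
  unfold pvStep1 pvQb
  dsimp only
  rw [if_pos hd]

theorem pvStep1_indirect (hs : List Int) (st : List Int × List (List (Int × Nat))) (i : Int)
    (q : List Int) (hd : ¬ pvDirect hs q) :
    pvStep1 hs st (i, q) = (st.1, PySem.List.pySetD st.2 (pvQb q)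
      ((PySem.List.pyGetD st.2 (pvQb q) []) ++ [(PySem.List.pyGetD hs (pvQa q) 0, i.toNat)])) := by
  unfold pvDirect pvQa pvQb at hd
  unfold pvStep1 pvQa pvQb
  dsimp only
  rw [if_neg hd]

theorem pvFold1_fst (hs : List Int) (qs : List (List Int)) :
    ∀ (s : Nat) (pre : List Int) (nq : List (List (Int × Nat))), pre.length = s →
      ((PySem.List.enumerate qs (s : Int)).foldl (pvStep1 hs)
          (pre ++ List.replicate qs.length (-1), nq)).1
        = pre ++ qs.map (fun q => if pvDirect hs q then pvQb q else -1) := by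
  induction qs with
  | nil => intro s pre nq hpre; simp
  | cons q qs ih =>
    intro s pre nq hpre
    rw [PySem.List.enumerate_cons, List.foldl_cons]
    have hrepl : List.replicate (q :: qs).length (-1 : Int) = (-1) :: List.replicate qs.length (-1) := rfl
    rw [hrepl]
    have hcast : (s : Int) + 1 = ((s + 1 : Nat) : Int) := by omega
    have hset : (pre ++ (-1) :: List.replicate qs.length (-1)).set s (pvQb q)
        = (pre ++ [pvQb q]) ++ List.replicate qs.length (-1) := by
      rw [List.set_append, if_neg (by omega)]
      simp [hpre]
    by_cases hd : pvDirect hs q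
    · rw [pvStep1_direct hs _ _ _ hd]
      dsimp only
      rw [PySem.List.pySetD_natCast, hset, hcast]
      rw [ih (s + 1) (pre ++ [pvQb q]) nq (by simp [hpre])]
      simp [hd]
    · rw [pvStep1_indirect hs _ _ _ hd]
      dsimp only
      have : pre ++ (-1) :: List.replicate qs.length (-1)
          = (pre ++ [(-1 : Int)]) ++ List.replicate qs.length (-1) := by simp
      rw [this, hcast]
      rw [ih (s + 1) (pre ++ [-1]) _ (by simp [hpre])]
      simp [hd]

theorem pv_getD_set {α : Type} (l : List (List α)) (b i : Nat) (v : List α) (hb : b < l.length) :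
    (l.set b v).getD i [] = if i = b then v else l.getD i [] := by
  rw [List.getD_eq_getElem?_getD, List.getElem?_set, List.getD_eq_getElem?_getD]
  rcases eq_or_ne i b with rfl | h
  · simp [hb]
  · simp [h, Ne.symm h]

theorem pvFold1_snd (hs : List Int) (qs : List (List Int)) (t : Nat) :
    ∀ (s : Nat) (res : List Int) (nq : List (List (Int × Nat))),
      (∀ q ∈ qs, 0 ≤ pvQa q ∧ 0 ≤ pvQb q ∧ pvQb q < (hs.length : Int)) →
      nq.length = hs.length →
      ∀ i : Nat,
        ((((PySem.List.enumerate qs (s : Int)).foldl (pvStep1 hs) (res, nq)).2.getD i []).filter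
            (fun e => e.2 == t))
          = ((nq.getD i []).filter (fun e => e.2 == t))
            ++ (match qs[t - s]? with
                | some q =>
                    if s ≤ t ∧ ¬ pvDirect hs q ∧ i = (pvQb q).toNat then
                      [(hs.getD (pvQa q).toNat 0, t)]
                    else []
                | none => []) := by
  induction qs with
  | nil => intro s res nq hq hlen i; simp
  | cons q qs ih =>
    intro s res nq hq hlen i
    obtain ⟨ha0, hb0, hblt⟩ := hq q (by simp)
    have hqs : ∀ q' ∈ qs, 0 ≤ pvQa q' ∧ 0 ≤ pvQb q' ∧ pvQb q' < (hs.length : Int) := by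
      intro q' hq'; exact hq q' (by simp [hq'])
    rw [PySem.List.enumerate_cons, List.foldl_cons]
    have hcast : (s : Int) + 1 = ((s + 1 : Nat) : Int) := by omega
    by_cases hd : pvDirect hs q
    · rw [pvStep1_direct hs _ _ _ hd]
      dsimp only
      rw [hcast, ih (s + 1) _ nq hqs hlen i]
      congr 1
      rcases Nat.lt_or_ge t s with hts | hts
      · have h1 : t - s = 0 := by omega
        have h2 : t - (s + 1) = 0 := by omega
        rw [h1, h2]
        cases qs[0]? with
        | none =>
          cases (q :: qs)[0]? with
          | none => rfl
          | some q' => dsimp only; rw [if_neg (by omega)]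
        | some q' =>
          dsimp only
          rw [if_neg (by omega)]
          cases (q :: qs)[(0 : Nat)]? with
          | none => rfl
          | some q'' => dsimp only; rw [if_neg (by omega)]
      · rcases Nat.eq_or_lt_of_le hts with rfl | hlt
        · have h1 : s - s = 0 := by omega
          have h2 : s - (s + 1) = 0 := by omega
          rw [h1, h2]
          simp only [List.getElem?_cons_zero]
          rw [if_neg (by simp [hd])]
          cases qs[0]? with
          | none => rfl
          | some q' => dsimp only; rw [if_neg (by omega)]
        · have h1 : t - s = (t - (s + 1)) + 1 := by omega
          rw [h1]
          simp only [List.getElem?_cons_succ]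
          cases qs[t - (s + 1)]? with
          | none => rfl
          | some q' =>
            dsimp only
            by_cases hc : ¬ pvDirect hs q' ∧ i = (pvQb q').toNat
            · rw [if_pos ⟨by omega, hc.1, hc.2⟩, if_pos ⟨by omega, hc.1, hc.2⟩]
            · rw [if_neg (by tauto), if_neg (by tauto)]
    · rw [pvStep1_indirect hs _ _ _ hd]
      dsimp only
      rw [PySem.List.pySetD_of_nonneg _ _ hb0]
      have hbnat : (pvQb q).toNat < nq.length := by omega
      rw [hcast, ih (s + 1) _ _ hqs (by rw [List.length_set]; exact hlen) i]
      rw [pv_getD_set _ _ _ _ hbnat]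
      have hgq : PySem.List.pyGetD nq (pvQb q) [] = nq.getD (pvQb q).toNat [] := by
        have h1 : pvQb q = (((pvQb q).toNat : Nat) : Int) := by omega
        conv_lhs => rw [h1]
        rw [PySem.List.pyGetD_natCast]
      rcases Nat.lt_or_ge t s with hts | hts
      · -- t < s : head entry has index s ≠ t, both contributions empty
        have h2 : t - (s + 1) = 0 := by omega
        have h1 : t - s = 0 := by omega
        rw [h1, h2]
        have hfil : ∀ base : List (Int × Nat),
            ((if i = (pvQb q).toNat then
                PySem.List.pyGetD nq (pvQb q) [] ++ [(PySem.List.pyGetD hs (pvQa q) 0, ((s : Int)).toNat)]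
              else nq.getD i []).filter (fun e => e.2 == t))
              = (nq.getD i []).filter (fun e => e.2 == t) := by
          intro base
          split
          · next hieq =>
            rw [hgq, List.filter_append]
            have : ((((s : Int)).toNat == t) : Bool) = false := by simp; omega
            simp [this, hieq]
            omega
          · rfl
        rw [hfil []]
        congr 1
        cases qs[0]? with
        | none =>
          cases (q :: qs)[0]? with
          | none => rfl
          | some q' => dsimp only; rw [if_neg (by omega)]
        | some q' =>
          dsimp only
          rw [if_neg (by omega)]
          cases (q :: qs)[(0:Nat)]? with
          | none => rfl
          | some q'' => dsimp only; rw [if_neg (by omega)]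
      · rcases Nat.eq_or_lt_of_le hts with rfl | hlt
        · -- t = s : the head adds exactly the RHS entry; tail adds nothing
          have h2 : s - (s + 1) = 0 := by omega
          have h1 : s - s = 0 := by omega
          rw [h1, h2]
          have htail : (match qs[0]? with
              | some q' => if s + 1 ≤ s ∧ ¬ pvDirect hs q' ∧ i = (pvQb q').toNat then
                  [(hs.getD (pvQa q').toNat 0, s)] else []
              | none => ([] : List (Int × Nat))) = [] := by
            cases qs[0]? with
            | none => rfl
            | some q' => dsimp only; rw [if_neg (by omega)]
          rw [htail, List.append_nil]
          simp only [List.getElem?_cons_zero]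
          split
          · next hieq =>
            rw [hgq, List.filter_append]
            have hA : PySem.List.pyGetD hs (pvQa q) 0 = hs.getD (pvQa q).toNat 0 := by
              have h1 : pvQa q = (((pvQa q).toNat : Nat) : Int) := by omega
              conv_lhs => rw [h1]
              rw [PySem.List.pyGetD_natCast]
            have hsT : ((((s : Int)).toNat == s) : Bool) = true := by simp
            simp only [List.filter_cons, hsT, List.filter_nil]
            simp [hd, hieq]
            rw [hA, List.getD_eq_getElem?_getD]
          · next hieq =>
            rw [if_neg (by tauto)]
            simp
        · -- s < t : head adds an entry with index s ≠ t; shift the match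
          have hfil :
              ((if i = (pvQb q).toNat then
                  PySem.List.pyGetD nq (pvQb q) [] ++ [(PySem.List.pyGetD hs (pvQa q) 0, ((s : Int)).toNat)]
                else nq.getD i []).filter (fun e => e.2 == t))
                = (nq.getD i []).filter (fun e => e.2 == t) := by
            split
            · next hieq =>
              rw [hgq, List.filter_append]
              have : ((((s : Int)).toNat == t) : Bool) = false := by simp; omega
              simp [this, hieq]
              omega
            · rfl
          rw [hfil]
          congr 1
          have h1 : t - s = (t - (s + 1)) + 1 := by omega
          rw [h1]
          simp only [List.getElem?_cons_succ]
          cases qs[t - (s + 1)]? with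
          | none => rfl
          | some q' =>
            dsimp only
            by_cases hc : ¬ pvDirect hs q' ∧ i = (pvQb q').toNat
            · rw [if_pos ⟨by omega, hc.1, hc.2⟩, if_pos ⟨by omega, hc.1, hc.2⟩]
            · rw [if_neg (by tauto), if_neg (by tauto)]

theorem pvProcModel_length (hs : List Int) (i : Nat) (bucket : List (Int × Nat)) :
    ∀ res : List Int, (pvProcModel hs i res bucket).length = res.length := by
  unfold pvProcModel
  induction bucket with
  | nil => intro res; rfl
  | cons e b ih =>
    intro res
    rw [List.foldl_cons]
    cases h : pvFindFrom hs e.1 (i + 1) with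
    | some j =>
      dsimp only
      rw [ih]
      exact List.length_set ..
    | none =>
      dsimp only
      exact ih res

theorem pvProcModel_get_none (hs : List Int) (i : Nat) (t : Nat) (bucket : List (Int × Nat))
    (hno : ∀ e ∈ bucket, e.2 ≠ t) :
    ∀ res : List Int, (pvProcModel hs i res bucket)[t]? = res[t]? := by
  unfold pvProcModel
  induction bucket with
  | nil => intro res; rfl
  | cons e b ih =>
    intro res
    rw [List.foldl_cons]
    have het : e.2 ≠ t := hno e (by simp)
    have hb : ∀ e' ∈ b, e'.2 ≠ t := fun e' he' => hno e' (by simp [he'])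
    cases h : pvFindFrom hs e.1 (i + 1) with
    | some j =>
      dsimp only
      rw [ih hb]
      exact List.getElem?_set_ne het
    | none =>
      dsimp only
      exact ih hb res

theorem pvProcModel_get_one (hs : List Int) (i : Nat) (t : Nat) (h : Int) :
    ∀ (bucket : List (Int × Nat)), bucket.filter (fun e => e.2 == t) = [(h, t)] →
    ∀ res : List Int, t < res.length →
      (pvProcModel hs i res bucket)[t]?
        = match pvFindFrom hs h (i + 1) with
          | some j => some (j : Int)
          | none => res[t]? := by
  intro bucket
  induction bucket with
  | nil => intro hone; simp at hone
  | cons e b ih =>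
    intro hone res hlt
    by_cases het : e.2 = t
    · have he : e = (h, t) ∧ b.filter (fun e => e.2 == t) = [] := by
        rw [List.filter_cons_of_pos (by simp [het])] at hone
        injection hone with h1 h2
        exact ⟨h1, h2⟩
      have hbno : ∀ e' ∈ b, e'.2 ≠ t := by
        intro e' he' hc
        have : e' ∈ b.filter (fun e => e.2 == t) := List.mem_filter.mpr ⟨he', by simp [hc]⟩
        rw [he.2] at this
        simp at this
      unfold pvProcModel
      rw [List.foldl_cons]
      rw [he.1]
      cases hff : pvFindFrom hs h (i + 1) with
      | some j =>
        dsimp only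
        have := pvProcModel_get_none hs i t b hbno (res.set t (j : Int))
        unfold pvProcModel at this
        rw [this]
        exact List.getElem?_set_self' .. |>.trans (by simp [hlt])
      | none =>
        dsimp only
        have := pvProcModel_get_none hs i t b hbno res
        unfold pvProcModel at this
        rw [this]
    · have hone' : b.filter (fun e => e.2 == t) = [(h, t)] := by
        rwa [List.filter_cons_of_neg (by simp [het])] at hone
      unfold pvProcModel
      rw [List.foldl_cons]
      cases hff : pvFindFrom hs e.1 (i + 1) with
      | some j =>
        dsimp only
        have := ih hone' (res.set e.2 (j : Int)) (by simp [hlt])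
        unfold pvProcModel at this
        rw [this]
        cases pvFindFrom hs h (i + 1) with
        | some k => rfl
        | none => exact List.getElem?_set_ne het
      | none =>
        dsimp only
        have := ih hone' res hlt
        unfold pvProcModel at this
        rw [this]

theorem pvApply_length (hs : List Int) (nq : List (List (Int × Nat))) :
    ∀ (k : Nat) (r : List Int), (pvApply hs nq k r).length = r.length := by
  intro k
  induction k with
  | zero => intro r; rfl
  | succ k ih =>
    intro r
    unfold pvApply
    rw [ih, pvProcModel_length]

theorem pvApply_get_none (hs : List Int) (nq : List (List (Int × Nat))) (t : Nat) :
    ∀ (k : Nat) (r : List Int),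
      (∀ i < k, ∀ e ∈ nq.getD i [], e.2 ≠ t) →
      (pvApply hs nq k r)[t]? = r[t]? := by
  intro k
  induction k with
  | zero => intro r _; rfl
  | succ k ih =>
    intro r hno
    unfold pvApply
    rw [ih _ (fun i hi => hno i (by omega))]
    exact pvProcModel_get_none hs k t _ (hno k (by omega)) r

theorem pvApply_get_one (hs : List Int) (nq : List (List (Int × Nat))) (t : Nat) (i0 : Nat) (h : Int) :
    ∀ (k : Nat) (r : List Int), i0 < k → t < r.length →
      ((nq.getD i0 []).filter (fun e => e.2 == t)) = [(h, t)] →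
      (∀ i < k, i ≠ i0 → ∀ e ∈ nq.getD i [], e.2 ≠ t) →
      (pvApply hs nq k r)[t]?
        = match pvFindFrom hs h (i0 + 1) with
          | some j => some (j : Int)
          | none => r[t]? := by
  intro k
  induction k with
  | zero => intro r h0; omega
  | succ k ih =>
    intro r hik hlt hone hno
    unfold pvApply
    rcases Nat.lt_or_ge i0 k with hlt' | hge
    · rw [ih _ hlt' (by rw [pvProcModel_length]; exact hlt) hone (fun i hi => hno i (by omega))]
      rw [pvProcModel_get_none hs k t _ (hno k (by omega) (by omega)) r]
    · have hk : i0 = k := by omega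
      subst hk
      rw [pvApply_get_none hs nq t _ _ (fun i hi => hno i (by omega) (by omega))]
      exact pvProcModel_get_one hs i0 t h _ hone r hlt

theorem pvScan_eq (hs : List Int) (h : Int) :
    ∀ j : Nat, pvScan hs h ((j : Nat) : Int)
      = match pvFindFrom hs h j with
        | some k => (k : Int)
        | none => -1 := by
  intro j
  fun_induction pvFindFrom hs h j with
  | case1 j hj hlt =>
    rw [pvScan]
    have hj' : ((j : Nat) : Int) < (hs.length : Int) := by omega
    rw [dif_pos hj']
    have hget : PySem.List.pyGetD hs ((j : Nat) : Int) 0 = hs[j] := by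
      rw [PySem.List.pyGetD_natCast]
      exact List.getD_eq_getElem hs 0 hj
    rw [hget, if_neg (by omega)]
  | case2 j hj hlt ih =>
    rw [pvScan]
    have hj' : ((j : Nat) : Int) < (hs.length : Int) := by omega
    rw [dif_pos hj']
    have hget : PySem.List.pyGetD hs ((j : Nat) : Int) 0 = hs[j] := by
      rw [PySem.List.pyGetD_natCast]
      exact List.getD_eq_getElem hs 0 hj
    rw [hget, if_pos (by omega)]
    have hcast : ((j : Nat) : Int) + 1 = (((j + 1 : Nat)) : Int) := by omega
    rw [hcast, ih]
  | case3 j hj =>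
    rw [pvScan]
    rw [dif_neg (by omega)]

theorem pvAlt_eq_map (hs : List Int) (qs : List (List Int)) :
    leftmostBuildingQueries_alt hs qs = qs.map (pvBVal hs) := by
  unfold leftmostBuildingQueries_alt
  have hstep : (fun (res : List Int) (q : List Int) =>
      let a0 := PySem.List.pyGetD q 0 0
      let b0 := PySem.List.pyGetD q 1 0
      let a := if a0 > b0 then b0 else a0
      let b := if a0 > b0 then a0 else b0
      if a = b ∨ PySem.List.pyGetD hs b 0 > PySem.List.pyGetD hs a 0 then
        res ++ [b]
      else
        res ++ [pvScan hs (PySem.List.pyGetD hs a 0) (b + 1)])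
      = fun res q => res ++ [pvBVal hs q] := by
    funext res q
    dsimp only
    unfold pvBVal pvDirect pvQa pvQb
    by_cases hc : (if PySem.List.pyGetD q 0 0 > PySem.List.pyGetD q 1 0 then PySem.List.pyGetD q 1 0
        else PySem.List.pyGetD q 0 0) = (if PySem.List.pyGetD q 0 0 > PySem.List.pyGetD q 1 0
        then PySem.List.pyGetD q 0 0 else PySem.List.pyGetD q 1 0) ∨
        PySem.List.pyGetD hs (if PySem.List.pyGetD q 0 0 > PySem.List.pyGetD q 1 0
        then PySem.List.pyGetD q 0 0 else PySem.List.pyGetD q 1 0) 0 >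
        PySem.List.pyGetD hs (if PySem.List.pyGetD q 0 0 > PySem.List.pyGetD q 1 0
        then PySem.List.pyGetD q 1 0 else PySem.List.pyGetD q 0 0) 0
    · rw [if_pos hc, if_pos (Or.symm hc)]
    · rw [if_neg hc, if_neg (fun hcc => hc (Or.symm hcc))]
  rw [hstep]
  exact PySem.List.foldl_append_singleton_eq_map (pvBVal hs) qs []

theorem pv_main_eq (hs : List Int) (qs : List (List Int))
    (hpre : ∀ q ∈ qs, q.length = 2 ∧ ∀ x ∈ q, 0 ≤ x ∧ x < (hs.length : Int)) :
    leftmostBuildingQueries hs qs = leftmostBuildingQueries_alt hs qs := by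
  have hbounds : ∀ q ∈ qs, 0 ≤ pvQa q ∧ 0 ≤ pvQb q ∧ pvQb q < (hs.length : Int) := by
    intro q hq
    obtain ⟨hlen2, hmem⟩ := hpre q hq
    have hir : ∀ i : Int, 0 ≤ i → i < 2 → PySem.Raise.InRange q.length i := by
      intro i hi1 hi2
      rw [hlen2]
      unfold PySem.Raise.InRange
      omega
    have h0 : PySem.List.pyGetD q 0 0 ∈ q := PySem.List.pyGetD_mem q 0 (hir 0 (by omega) (by omega))
    have h1 : PySem.List.pyGetD q 1 0 ∈ q := PySem.List.pyGetD_mem q 0 (hir 1 (by omega) (by omega))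
    have hb0 := hmem _ h0
    have hb1 := hmem _ h1
    unfold pvQa pvQb
    split <;> omega
  have hnq0 : ∀ i : Nat, ((List.replicate hs.length ([] : List (Int × Nat))).getD i []) = [] := by
    intro i
    rw [List.getD_eq_getElem?_getD, List.getElem?_replicate]
    split <;> rfl
  unfold leftmostBuildingQueries
  dsimp only
  have hfst : ((PySem.List.enumerate qs 0).foldl (pvStep1 hs)
      (List.replicate qs.length (-1), List.replicate hs.length [])).1
      = qs.map (fun q => if pvDirect hs q then pvQb q else -1) := by
    have := pvFold1_fst hs qs 0 [] (List.replicate hs.length []) rfl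
    simpa using this
  have hsnd := pvFold1_snd hs qs
  have hms : pvMStack hs hs.length = [] := by rw [pvMStack]; simp
  have hloop := pvLoop2_eq hs
      ((PySem.List.enumerate qs 0).foldl (pvStep1 hs)
        (List.replicate qs.length (-1), List.replicate hs.length [])).2
      hs.length
      ((PySem.List.enumerate qs 0).foldl (pvStep1 hs)
        (List.replicate qs.length (-1), List.replicate hs.length [])).1
      (le_refl _)
  rw [hms] at hloop
  rw [hloop]
  rw [pvAlt_eq_map]
  set st1 := (PySem.List.enumerate qs 0).foldl (pvStep1 hs)
      (List.replicate qs.length (-1), List.replicate hs.length []) with hst1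
  apply List.ext_getElem?
  intro t
  rcases Nat.lt_or_ge t qs.length with htq | htq
  · -- in range
    have hq : qs[t]? = some qs[t] := List.getElem?_eq_getElem htq
    have hqmem : qs[t] ∈ qs := List.getElem_mem htq
    obtain ⟨hqa0, hqb0, hqblt⟩ := hbounds _ hqmem
    have hchar := hsnd t 0 (List.replicate qs.length (-1)) (List.replicate hs.length [])
        hbounds (by simp)
    simp only [Nat.cast_zero, Nat.sub_zero, hq, hnq0, List.filter_nil, List.nil_append,
      ← hst1] at hchar
    have hlen1 : st1.1.length = qs.length := by rw [hfst]; simp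
    by_cases hd : pvDirect hs qs[t]
    · have hnone : ∀ i < hs.length, ∀ e ∈ st1.2.getD i [], e.2 ≠ t := by
        intro i hi e he hc
        have := hchar i
        rw [if_neg (by tauto)] at this
        have : e ∈ (st1.2.getD i []).filter (fun e => e.2 == t) :=
          List.mem_filter.mpr ⟨he, by simp [hc]⟩
        rw [hchar i, if_neg (by tauto)] at this
        simp at this
      rw [pvApply_get_none hs st1.2 t hs.length st1.1 (fun i hi => hnone i hi)]
      rw [hfst]
      rw [List.getElem?_map, List.getElem?_map, hq]
      simp only [Option.map_some]
      rw [if_pos hd]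
      unfold pvBVal
      rw [if_pos hd]
    · set i0 := (pvQb qs[t]).toNat with hi0
      have hi0lt : i0 < hs.length := by omega
      have hone : (st1.2.getD i0 []).filter (fun e => e.2 == t)
          = [(hs.getD (pvQa qs[t]).toNat 0, t)] := by
        rw [hchar i0, if_pos ⟨Nat.zero_le t, hd, rfl⟩]
      have hno : ∀ i < hs.length, i ≠ i0 → ∀ e ∈ st1.2.getD i [], e.2 ≠ t := by
        intro i hi hne e he hc
        have : e ∈ (st1.2.getD i []).filter (fun e => e.2 == t) :=
          List.mem_filter.mpr ⟨he, by simp [hc]⟩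
        rw [hchar i, if_neg (by tauto)] at this
        simp at this
      rw [pvApply_get_one hs st1.2 t i0 (hs.getD (pvQa qs[t]).toNat 0) hs.length st1.1
          hi0lt (by omega) hone hno]
      rw [List.getElem?_map, hq]
      simp only [Option.map_some]
      unfold pvBVal
      rw [if_neg hd]
      have hA : PySem.List.pyGetD hs (pvQa qs[t]) 0 = hs.getD (pvQa qs[t]).toNat 0 := by
        have h1 : pvQa qs[t] = (((pvQa qs[t]).toNat : Nat) : Int) := by omega
        conv_lhs => rw [h1]
        rw [PySem.List.pyGetD_natCast]
      have hcast : pvQb qs[t] + 1 = (((i0 + 1 : Nat)) : Int) := by omega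
      rw [hA, hcast, pvScan_eq]
      cases pvFindFrom hs (hs.getD (pvQa qs[t]).toNat 0) (i0 + 1) with
      | some j => rfl
      | none =>
        dsimp only
        rw [hfst, List.getElem?_map, hq]
        simp only [Option.map_some]
        rw [if_neg hd]
  · -- out of range: both none
    have h1 : (pvApply hs st1.2 hs.length st1.1).length = qs.length := by
      rw [pvApply_length]
      rw [hfst]; simp
    rw [List.getElem?_eq_none (by omega), List.getElem?_eq_none (by simp; omega)]

-- ===== VERDICT (by name: the statement is the Claim_ definition above) =====
theorem leftmostBuildingQueries_spec : Claim_equal_leftmostBuildingQueries := by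
  intro hs qs hdom hpre
  unfold Pre_leftmostBuildingQueries at hpre
  unfold Spec_leftmostBuildingQueries
  exact pv_main_eq hs qs hpre
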